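-- pv_equiv track=rewrite | github.com/miliar/Code_Jam_Webscraper | solutions_python/Problem_201/2492.py | _game_helper
-- ===== SOURCE A (Python) =====
-- def _game_helper(gaps, people):
--     """
--     This is a helper function for the game. Returns the
--     max and min of the gap in stalls.
--     """
--     # base case 1: when there are only gaps of 1,
--     # there are no gaps after putting in a person
--     if (1,) * len(gaps) == gaps:
--         return (0, 0)
--
--     else:
--
--         # get the max of the gaps
--         max_of_gap = max(gaps)
--
--         # remove from tuple
--         max_index = gaps.index(max_of_gap)
--         gaps = gaps[:max_index] + gaps[max_index + 1:]
--
--         # divide by 2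
--         middle = max_of_gap // 2
--
--         # if even
--         if max_of_gap % 2 == 0:
--
--             # ready to output if people - 1 == 0
--             if people - 1 == 0:
--                 gaps = gaps + (middle, middle - 1)
--                 return (middle, middle - 1)
--
--             # if still need to put people in
--             else:
--                 if middle - 1 != 0:
--                     gaps = gaps + (middle, middle - 1)
--                 else:
--                     gaps = gaps + (middle,)
--                 return _game_helper(gaps, people - 1)
--
--         # if odd
--         else:
--             gaps += (middle, middle)
--             # ready to output
--             if people - 1 == 0:
--                 return (middle, middle)
--             else:
--                 return _game_helper(gaps, people - 1)
-- ===== SOURCE B (Python) =====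
-- def _game_helper(gaps, people):
--     # Group equal gap sizes with their multiplicities in a dict and split a whole
--     # group of maximal gaps per round, instead of re-scanning and rebuilding the
--     # tuple once per person.
--     counts = {}
--     for g in gaps:
--         counts[g] = counts.get(g, 0) + 1
--     while True:
--         if all(k == 1 for k in counts):
--             return (0, 0)
--         m = max(counts)
--         c = counts.pop(m)
--         hi, lo = m // 2, (m - 1) // 2
--         if 0 < people <= c:
--             return (hi, lo)
--         people -= c
--         if hi != 0:
--             counts[hi] = counts.get(hi, 0) + c
--         if lo != 0:
--             counts[lo] = counts.get(lo, 0) + c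
-- ===== Notes on version B (the rewrite author's own statement) =====
-- stated objective: faster
-- what changed: B replaces A's per-person recursion (each step rescans the tuple for max/index and rebuilds it) by a multiplicity dict that splits a whole group of equal maximal gaps per round, so the cost depends on the number of distinct gap sizes instead of on people.
-- outside the precondition, e.g. on _game_helper((-3, -3), 3): A returns (-1, -1), B returns (-1, -2); on _game_helper((0,), 2): A returns (0, -1), B returns (-1, -1)
import Mathlib
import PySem

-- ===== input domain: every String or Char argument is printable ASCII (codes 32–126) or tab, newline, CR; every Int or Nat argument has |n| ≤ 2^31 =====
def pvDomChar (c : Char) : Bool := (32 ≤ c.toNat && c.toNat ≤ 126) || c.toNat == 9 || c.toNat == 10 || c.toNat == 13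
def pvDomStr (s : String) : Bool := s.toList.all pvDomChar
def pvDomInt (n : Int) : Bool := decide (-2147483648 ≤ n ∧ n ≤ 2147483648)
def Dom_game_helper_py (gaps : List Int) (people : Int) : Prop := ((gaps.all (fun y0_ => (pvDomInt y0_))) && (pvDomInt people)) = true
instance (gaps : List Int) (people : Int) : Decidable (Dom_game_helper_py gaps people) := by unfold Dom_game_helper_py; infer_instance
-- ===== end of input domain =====

-- B groups equal gap sizes in a multiplicity dict and splits a whole group of maximal
-- gaps per round (instead of one person per recursive call), for an asymptotic speed-up.


-- ===== PORT A =====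
-- fuel-indexed transliteration of A's recursion (A can diverge outside Pre_,
-- e.g. on non-positive gaps with non-positive people); the wrapper supplies
-- fuel that is proved sufficient on Pre_
def aLoop : Nat → List Int → Int → Option (List Int)
  | 0, _, _ => none
  | fuel + 1, gaps, people =>
    -- if (1,) * len(gaps) == gaps: return (0, 0)
    if gaps = List.replicate gaps.length 1 then some [0, 0]
    else
      match PySem.List.max? gaps (fun x => x) with           -- max(gaps)
      | none => none
      | some maxOfGap =>
        match PySem.List.index? gaps maxOfGap with           -- gaps.index(...)
        | none => none
        | some maxIndex =>
          let gaps1 := PySem.List.slice gaps none (some (maxIndex : Int)) ++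
                       PySem.List.slice gaps (some ((maxIndex : Int) + 1)) none
          let middle := PySem.Int.floordiv maxOfGap 2
          if PySem.Int.mod maxOfGap 2 = 0 then
            if people - 1 = 0 then some [middle, middle - 1]
            else
              let gaps2 := if middle - 1 ≠ 0 then gaps1 ++ [middle, middle - 1]
                           else gaps1 ++ [middle]
              aLoop fuel gaps2 (people - 1)
          else
            let gaps2 := gaps1 ++ [middle, middle]
            if people - 1 = 0 then some [middle, middle]
            else aLoop fuel gaps2 (people - 1)

def game_helper_py (gaps : List Int) (people : Int) : List Int :=
  (aLoop (people.toNat + (gaps.map Int.toNat).sum + 1) gaps people).getD []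

-- ===== PORT B =====
-- fuel-indexed transliteration of B's while-loop (same divergence remark)
def bLoop : Nat → PySem.Dict Int Int → Int → Option (List Int)
  | 0, _, _ => none
  | fuel + 1, counts, people =>
    if (PySem.Dict.keys counts).all (fun k => k == 1) then some [0, 0]
    else
      match PySem.List.max? (PySem.Dict.keys counts) (fun x => x) with  -- max(counts)
      | none => none
      | some m =>
        let c := PySem.Dict.getD counts m 0                             -- counts.pop(m)
        let counts1 := PySem.Dict.erase counts m
        let hi := PySem.Int.floordiv m 2
        let lo := PySem.Int.floordiv (m - 1) 2
        if 0 < people ∧ people ≤ c then some [hi, lo]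
        else
          let people1 := people - c
          let counts2 := if hi ≠ 0 then PySem.Dict.insert counts1 hi (PySem.Dict.getD counts1 hi 0 + c) else counts1
          let counts3 := if lo ≠ 0 then PySem.Dict.insert counts2 lo (PySem.Dict.getD counts2 lo 0 + c) else counts2
          bLoop fuel counts3 people1

def game_helper_py_alt (gaps : List Int) (people : Int) : List Int :=
  let counts := gaps.foldl (fun d g => PySem.Dict.insert d g (PySem.Dict.getD d g 0 + 1)) PySem.Dict.empty
  (bLoop (people.toNat + (gaps.map Int.toNat).sum + 1) counts people).getD []

-- ===== PRECONDITION & SPEC =====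
-- Pre_ restricts to the task's natural domain: positive gap sizes.  It excludes some
-- inputs A returns on: with non-positive gaps a "half gap" can exceed the maximal
-- gap, so A's one-at-a-time split order and B's grouped order legitimately differ
-- there (and A can even diverge on such inputs).
def Pre_game_helper_py (gaps : List Int) (people : Int) : Prop :=
  ∀ g ∈ gaps, 1 ≤ g
instance (gaps : List Int) (people : Int) : Decidable (Pre_game_helper_py gaps people) := by
  unfold Pre_game_helper_py; infer_instance

def pvWitness_game_helper_py : List Int × Int := ([7, 3, 1], 4)

def Spec_game_helper_py (gaps : List Int) (people : Int) (out : List Int) : Prop := out = game_helper_py_alt gaps people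
instance (gaps : List Int) (people : Int) (out : List Int) : Decidable (Spec_game_helper_py gaps people out) := by unfold Spec_game_helper_py; infer_instance

-- ===== CLAIM (what is proved, stated in full; the proofs are below) =====
def Claim_equal_game_helper_py : Prop := ∀ (gaps : List Int) (people : Int), Dom_game_helper_py gaps people → Pre_game_helper_py gaps people → Spec_game_helper_py gaps people (game_helper_py gaps people)

-- ===== LEMMAS AND PROOFS =====

-- the pair A returns when it places the last person into a gap of size m
def ansOf (m : Int) : List Int :=
  if PySem.Int.mod m 2 = 0 then [PySem.Int.floordiv m 2, PySem.Int.floordiv m 2 - 1]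
  else [PySem.Int.floordiv m 2, PySem.Int.floordiv m 2]

-- the pieces A appends when it splits a gap of size m and keeps going
def pcs (m : Int) : List Int :=
  if PySem.Int.mod m 2 = 0 then
    (if PySem.Int.floordiv m 2 - 1 ≠ 0 then [PySem.Int.floordiv m 2, PySem.Int.floordiv m 2 - 1]
     else [PySem.Int.floordiv m 2])
  else [PySem.Int.floordiv m 2, PySem.Int.floordiv m 2]

theorem allOnes_iff (l : List Int) : (l = List.replicate l.length 1) ↔ ∀ x ∈ l, x = 1 := by
  constructor
  · intro h x hx
    rw [h] at hx
    exact (List.eq_of_mem_replicate hx)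
  · intro h
    exact List.eq_replicate_of_mem h

theorem max?_id_eq {l : List Int} {m : Int} (hm : m ∈ l) (hub : ∀ x ∈ l, x ≤ m) :
    PySem.List.max? l (fun x => x) = some m := by
  cases h : PySem.List.max? l (fun x => x) with
  | none => rw [PySem.List.max?_eq_none_iff] at h; simp [h] at hm
  | some m' =>
    have h1 : m' ≤ m := hub m' (PySem.List.max?_mem h)
    have h2 : m ≤ m' := PySem.List.max?_isMax h m hm
    rw [le_antisymm h1 h2]

theorem sliceErase {l : List Int} {v : Int} {i : Nat} (h : PySem.List.index? l v = some i) :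
    PySem.List.slice l none (some (i : Int)) ++ PySem.List.slice l (some ((i : Int) + 1)) none
      = l.erase v := by
  obtain ⟨pre, suf, hsplit, hlen, hpre⟩ := (PySem.List.index?_eq_some_iff _ _ _).1 h
  have h1 : PySem.List.slice l none (some (i : Int)) = l.take i := PySem.List.slice_to_natCast l i
  have h2 : PySem.List.slice l (some ((i : Int) + 1)) none = l.drop (i + 1) := by
    have := PySem.List.slice_from_natCast l (i + 1)
    rw [← this]; norm_num
  rw [h1, h2, hsplit, ← hlen]
  rw [List.take_left]
  have hd : List.drop (pre.length + 1) (pre ++ v :: suf) = suf := by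
    have he : pre ++ v :: suf = (pre ++ [v]) ++ suf := by simp
    have hl : pre.length + 1 = (pre ++ [v]).length := by simp
    rw [he, hl, List.drop_left]
  rw [hd, List.erase_append_right _ (by simpa using hpre), List.erase_cons_head]

theorem filter_ne_erase (l : List Int) (a : Int) :
    (l.erase a).filter (fun x => x ≠ a) = l.filter (fun x => x ≠ a) := by
  induction l with
  | nil => rfl
  | cons x t ih =>
    by_cases hx : x = a
    · subst hx; simp [List.erase_cons_head]
    · rw [List.erase_cons_tail (by simpa using hx)]
      simp only [List.filter_cons]
      rw [ih]

theorem fd2 (m : Int) : PySem.Int.floordiv m 2 = m / 2 :=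
  PySem.Int.floordiv_eq_ediv_of_pos (by norm_num)

theorem md2 (m : Int) : PySem.Int.mod m 2 = m % 2 :=
  PySem.Int.mod_eq_emod_of_pos (by norm_num)

theorem pcs_bounds {m x : Int} (hm : 2 ≤ m) (hx : x ∈ pcs m) : 1 ≤ x ∧ x < m := by
  unfold pcs at hx
  rw [fd2, md2] at hx
  split_ifs at hx with h1 h2 <;> simp at hx <;> omega

theorem ansOf_eq {m : Int} (hm : 2 ≤ m) :
    ansOf m = [PySem.Int.floordiv m 2, PySem.Int.floordiv (m - 1) 2] := by
  unfold ansOf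
  rw [fd2, fd2, md2]
  split_ifs with h1 <;> simp <;> omega

theorem pcs_count {m : Int} (hm : 2 ≤ m) (k : Int) :
    ((pcs m).count k : Int)
      = (if k = PySem.Int.floordiv m 2 then 1 else 0)
        + (if PySem.Int.floordiv (m - 1) 2 ≠ 0 ∧ k = PySem.Int.floordiv (m - 1) 2 then 1 else 0) := by
  unfold pcs
  rw [fd2, fd2, md2]
  split_ifs with h1 h2 <;> simp_all [List.count_cons, List.count_nil, Int.emod_emod_of_dvd] <;>
    omega

theorem pcs_mem {m : Int} (hm : 2 ≤ m) (k : Int) :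
    k ∈ pcs m ↔ (k = PySem.Int.floordiv m 2
      ∨ (PySem.Int.floordiv (m - 1) 2 ≠ 0 ∧ k = PySem.Int.floordiv (m - 1) 2)) := by
  unfold pcs
  rw [fd2, fd2, md2]
  split_ifs with h1 h2 <;> simp <;> omega

theorem count_flatten_replicate (n : Nat) (xs : List Int) (k : Int) :
    (List.flatten (List.replicate n xs)).count k = n * xs.count k := by
  induction n with
  | zero => simp
  | succ n ih => simp [List.replicate_succ, List.count_append, ih, Nat.succ_mul]; ring

theorem mem_flatten_replicate {n : Nat} (hn : 0 < n) (xs : List Int) (x : Int) :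
    x ∈ List.flatten (List.replicate n xs) ↔ x ∈ xs := by
  cases n with
  | zero => omega
  | succ n => simp [List.replicate_succ]

theorem dget?_erase (d : PySem.Dict Int Int) (m k : Int) :
    (d.erase m).get? k = if k = m then none else d.get? k := by
  obtain ⟨items⟩ := d
  by_cases hkm : k = m
  · subst hkm
    simp only [PySem.Dict.erase, PySem.Dict.get?, if_pos rfl]
    rw [List.find?_eq_none.2]
    · rfl
    · intro p hp
      simp only [List.mem_filter] at hp
      simpa using hp.2
  · rw [if_neg hkm]
    simp only [PySem.Dict.erase, PySem.Dict.get?]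
    congr 1
    induction items with
    | nil => rfl
    | cons p t ih =>
      rw [List.filter_cons]
      by_cases hpm : p.1 = m
      · have h1 : (!(p.1 == m)) = false := by simp [hpm]
        have h2 : (p.1 == k) = false := by simp [hpm]; omega
        rw [if_neg (by simp [h1]), List.find?_cons, h2, ih]
      · have h1 : (!(p.1 == m)) = true := by simp [hpm]
        rw [if_pos h1, List.find?_cons, List.find?_cons]
        cases h2 : (p.1 == k) with
        | true => rfl
        | false => exact ih

theorem dgetD_erase (d : PySem.Dict Int Int) (m k : Int) :
    (d.erase m).getD k 0 = if k = m then 0 else d.getD k 0 := by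
  simp only [PySem.Dict.getD, dget?_erase]
  split_ifs <;> simp

theorem dkeys_erase_mem (d : PySem.Dict Int Int) (m k : Int) :
    k ∈ (d.erase m).keys ↔ k ≠ m ∧ k ∈ d.keys := by
  simp only [PySem.Dict.erase, PySem.Dict.keys, List.mem_map, List.mem_filter]
  constructor
  · rintro ⟨p, ⟨hp, hne⟩, rfl⟩
    exact ⟨by simpa using hne, p, hp, rfl⟩
  · rintro ⟨hne, p, hp, rfl⟩
    exact ⟨p, ⟨hp, by simpa using hne⟩, rfl⟩

theorem dgetD_insert_add (d : PySem.Dict Int Int) (h c k : Int) :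
    (d.insert h (d.getD h 0 + c)).getD k 0 = d.getD k 0 + if k = h then c else 0 := by
  rw [PySem.Dict.getD_insert]
  split_ifs with hk
  · subst hk; ring
  · ring

theorem dcond_insert_add (d : PySem.Dict Int Int) (h c k : Int) :
    (if h ≠ 0 then d.insert h (d.getD h 0 + c) else d).getD k 0
      = d.getD k 0 + if h ≠ 0 ∧ k = h then c else 0 := by
  by_cases hh : h = 0
  · simp [hh]
  · rw [if_pos hh, dgetD_insert_add]
    congr 1
    by_cases hkh : k = h <;> simp [hh, hkh]

theorem dcond_insert_mem (d : PySem.Dict Int Int) (h v k : Int) :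
    (k ∈ (if h ≠ 0 then d.insert h v else d).keys) ↔ ((h ≠ 0 ∧ k = h) ∨ k ∈ d.keys) := by
  by_cases hh : h = 0
  · simp [hh]
  · rw [if_pos hh, PySem.Dict.mem_keys_insert]
    constructor
    · rintro (rfl | hk)
      · exact Or.inl ⟨hh, rfl⟩
      · exact Or.inr hk
    · rintro (⟨_, rfl⟩ | hk)
      · exact Or.inl rfl
      · exact Or.inr hk

theorem count_filter_ne (l : List Int) (m k : Int) :
    (l.filter (fun x => x ≠ m)).count k = if k = m then 0 else l.count k := by
  split_ifs with hkm
  · subst hkm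
    rw [List.count_eq_zero]
    simp
  · rw [List.count_filter]
    simp [hkm]

-- one step of A, in erase/pcs form
theorem aStep {gaps : List Int} {m : Int} (fuel : Nat) (people : Int)
    (hno : ¬ ∀ x ∈ gaps, x = 1)
    (hmax : PySem.List.max? gaps (fun x => x) = some m) :
    aLoop (fuel + 1) gaps people
      = if people = 1 then some (ansOf m)
        else aLoop fuel (gaps.erase m ++ pcs m) (people - 1) := by
  have hmem : m ∈ gaps := PySem.List.max?_mem hmax
  obtain ⟨i, hi⟩ : ∃ i, PySem.List.index? gaps m = some i := by
    cases h : PySem.List.index? gaps m with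
    | none => rw [PySem.List.index?_eq_none_iff] at h; exact absurd hmem h
    | some i => exact ⟨i, rfl⟩
  have hbase : ¬ (gaps = List.replicate gaps.length 1) := fun h => hno ((allOnes_iff gaps).1 h)
  simp only [aLoop, if_neg hbase, hmax, hi, sliceErase hi]
  by_cases hp : people = 1
  · have h0 : people - 1 = 0 := by omega
    by_cases hmod : PySem.Int.mod m 2 = 0 <;>
      (simp [hmod, h0, hp, ansOf]; try (split_ifs <;> rfl))
  · have h0 : people - 1 ≠ 0 := by omega
    by_cases hmod : PySem.Int.mod m 2 = 0 <;>
      (simp [hmod, h0, hp, pcs]; try (split_ifs <;> rfl))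

-- A's answer when the remaining people fit inside the multiplicity of the maximum
theorem ansLemma : ∀ (fuel : Nat) (l : List Int) (p m : Int),
    1 ≤ p → p.toNat ≤ fuel → (∀ x ∈ l, 1 ≤ x) → (∀ x ∈ l, x ≤ m) → 2 ≤ m →
    p ≤ (l.count m : Int) → aLoop fuel l p = some (ansOf m) := by
  intro fuel
  induction fuel with
  | zero => intro l p m hp hf _ _ _ _; omega
  | succ fuel ih =>
    intro l p m hp hf h1 hub hm hc
    have hmem : m ∈ l := by
      have : 1 ≤ l.count m := by omega
      exact List.count_pos_iff.1 (by omega)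
    have hno : ¬ ∀ x ∈ l, x = 1 := fun h => by have := h m hmem; omega
    rw [aStep fuel p hno (max?_id_eq hmem hub)]
    by_cases hp1 : p = 1
    · simp [hp1]
    · rw [if_neg hp1]
      apply ih (l.erase m ++ pcs m) (p - 1) m (by omega) (by omega)
      · intro x hx
        rcases List.mem_append.1 hx with h | h
        · exact h1 x (List.mem_of_mem_erase h)
        · exact (pcs_bounds hm h).1
      · intro x hx
        rcases List.mem_append.1 hx with h | h
        · exact hub x (List.mem_of_mem_erase h)
        · exact le_of_lt (pcs_bounds hm h).2
      · exact hm
      · have hcount : (l.erase m ++ pcs m).count m = l.count m - 1 := by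
          rw [List.count_append, List.count_erase_self]
          have : (pcs m).count m = 0 := by
            rw [List.count_eq_zero]
            intro h; have := (pcs_bounds hm h).2; omega
          omega
        rw [hcount]
        have : 1 ≤ l.count m := List.count_pos_iff.2 hmem
        push_cast
        omega

-- A crosses a whole group of c maximal gaps in c steps
theorem stepLemma : ∀ (c : Nat) (fuel : Nat) (l : List Int) (p m : Int),
    (∀ x ∈ l, 1 ≤ x) → (∀ x ∈ l, x ≤ m) → 2 ≤ m → l.count m = c →
    (p ≤ 0 ∨ (c : Int) < p) → c ≤ fuel →
    aLoop fuel l p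
      = aLoop (fuel - c) (l.filter (fun x => x ≠ m) ++ List.flatten (List.replicate c (pcs m))) (p - c) := by
  intro c
  induction c with
  | zero =>
    intro fuel l p m h1 hub hm hc hp hf
    have hm0 : m ∉ l := by
      intro h
      have := List.count_pos_iff.2 h
      omega
    have hfl : l.filter (fun x => x ≠ m) = l := by
      rw [List.filter_eq_self]
      intro a ha
      simp only [ne_eq, decide_eq_true_eq]
      rintro rfl
      exact hm0 ha
    simp only [Nat.sub_zero, Nat.cast_zero, sub_zero, List.replicate_zero,
      List.flatten_nil, List.append_nil, hfl]
  | succ c ih =>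
    intro fuel l p m h1 hub hm hc hp hf
    have hmem : m ∈ l := List.count_pos_iff.1 (by omega)
    have hno : ¬ ∀ x ∈ l, x = 1 := fun h => by have := h m hmem; omega
    obtain ⟨fn, rfl⟩ : ∃ fn, fuel = fn + 1 := ⟨fuel - 1, by omega⟩
    rw [aStep fn p hno (max?_id_eq hmem hub)]
    have hp1 : p ≠ 1 := by
      rcases hp with h | h
      · omega
      · push_cast at h; omega
    rw [if_neg hp1]
    have hcount : (l.erase m ++ pcs m).count m = c := by
      rw [List.count_append, List.count_erase_self]
      have : (pcs m).count m = 0 := by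
        rw [List.count_eq_zero]; intro h; have := (pcs_bounds hm h).2; omega
      omega
    rw [ih fn (l.erase m ++ pcs m) (p - 1) m
      (by intro x hx; rcases List.mem_append.1 hx with h | h
          · exact h1 x (List.mem_of_mem_erase h)
          · exact (pcs_bounds hm h).1)
      (by intro x hx; rcases List.mem_append.1 hx with h | h
          · exact hub x (List.mem_of_mem_erase h)
          · exact le_of_lt (pcs_bounds hm h).2)
      hm hcount (Or.imp (fun h => by omega) (fun h => by push_cast at h ⊢; omega) hp)
      (by omega)]
    have hlists : (l.erase m ++ pcs m).filter (fun x => x ≠ m) ++ List.flatten (List.replicate c (pcs m))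
        = l.filter (fun x => x ≠ m) ++ List.flatten (List.replicate (c + 1) (pcs m)) := by
      rw [List.filter_append, filter_ne_erase]
      have hpcs : (pcs m).filter (fun x => x ≠ m) = pcs m := by
        rw [List.filter_eq_self]
        intro a ha
        have := (pcs_bounds hm ha).2
        simp; omega
      rw [hpcs, List.replicate_succ, List.flatten_cons, List.append_assoc]
    rw [hlists]
    congr 1
    · omega
    · push_cast; ring

-- total gap mass, used to bound the number of steps when people ≤ 0
def sumNat (l : List Int) : Nat := (l.map Int.toNat).sum

theorem sumNat_append (a b : List Int) : sumNat (a ++ b) = sumNat a + sumNat b := by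
  simp [sumNat]

theorem sumNat_filter_count (l : List Int) (m : Int) :
    sumNat l = sumNat (l.filter (fun x => x ≠ m)) + l.count m * m.toNat := by
  induction l with
  | nil => simp [sumNat]
  | cons x t ih =>
    by_cases hx : x = m
    · subst hx
      have hfc : (x :: t).filter (fun y => y ≠ x) = t.filter (fun y => y ≠ x) := by simp
      have hcc : (x :: t).count x = t.count x + 1 := by simp
      have hs : sumNat (x :: t) = x.toNat + sumNat t := by simp [sumNat]
      rw [hfc, hcc, hs, ih, Nat.succ_mul]
      omega
    · have hmx : ¬ m = x := fun h => hx h.symm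
      have hfc : (x :: t).filter (fun y => y ≠ m) = x :: t.filter (fun y => y ≠ m) := by
        simp [hx]
      have hcc : (x :: t).count m = t.count m := by
        rw [List.count_cons]
        simp [hx]
      have hs1 : sumNat (x :: t) = x.toNat + sumNat t := by simp [sumNat]
      have hs2 : sumNat (x :: t.filter (fun y => y ≠ m))
          = x.toNat + sumNat (t.filter (fun y => y ≠ m)) := by simp [sumNat]
      rw [hfc, hcc, hs1, hs2, ih]
      omega

theorem sumNat_flatten_replicate (n : Nat) (xs : List Int) :
    sumNat (List.flatten (List.replicate n xs)) = n * sumNat xs := by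
  induction n with
  | zero => simp [sumNat]
  | succ n ih => rw [List.replicate_succ, List.flatten_cons, sumNat_append, ih]; ring

theorem sumNat_pcs {m : Int} (hm : 2 ≤ m) : sumNat (pcs m) = m.toNat - 1 := by
  unfold pcs
  rw [fd2, md2]
  split_ifs with h1 h2 <;> simp [sumNat] <;> omega

-- the main simulation: A's list and B's multiplicity dict stay in lockstep
theorem mainLemma : ∀ (fB : Nat) (l : List Int) (d : PySem.Dict Int Int) (p : Int) (fA : Nat),
    (∀ k, d.getD k 0 = (l.count k : Int)) →
    (∀ k, k ∈ d.keys ↔ k ∈ l) →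
    (∀ x ∈ l, 1 ≤ x) →
    ((1 ≤ p ∧ p.toNat ≤ fA ∧ p.toNat ≤ fB) ∨ (p ≤ 0 ∧ sumNat l + 1 ≤ fA ∧ sumNat l + 1 ≤ fB)) →
    aLoop fA l p = bLoop fB d p := by
  intro fB
  induction fB with
  | zero => intro l d p fA _ _ _ hfuel; rcases hfuel with ⟨h1, h2, h3⟩ | ⟨h1, h2, h3⟩ <;> omega
  | succ fB ih =>
    intro l d p fA hcnt hkeys h1 hfuel
    by_cases hall : (PySem.Dict.keys d).all (fun k => k == 1)
    · -- every key is 1: both sides return [0, 0]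
      have hones : ∀ x ∈ l, x = 1 := by
        intro x hx
        have := (List.all_eq_true.1 hall) x ((hkeys x).2 hx)
        simpa using this
      obtain ⟨fn, rfl⟩ : ∃ fn, fA = fn + 1 :=
        ⟨fA - 1, by rcases hfuel with ⟨h1', h2', h3'⟩ | ⟨h1', h2', h3'⟩ <;> omega⟩
      simp only [aLoop, bLoop, hall, if_pos ((allOnes_iff l).2 hones)]
      simp
    · -- there is a key ≠ 1; take the maximal one
      obtain ⟨k0, hk0, hk0ne⟩ : ∃ k, k ∈ d.keys ∧ ¬ (k == 1) := by
        by_contra h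
        push_neg at h
        exact hall (List.all_eq_true.2 (fun k hk => by simpa using (h k hk)))
      have hk0l : k0 ∈ l := (hkeys k0).1 hk0
      have hkeysne : d.keys ≠ [] := fun h => by simp [h] at hk0
      obtain ⟨m, hmax⟩ : ∃ m, PySem.List.max? d.keys (fun x => x) = some m := by
        cases h : PySem.List.max? d.keys (fun x => x) with
        | none => exact absurd ((PySem.List.max?_eq_none_iff _ _).1 h) hkeysne
        | some m => exact ⟨m, rfl⟩
      have hml : m ∈ l := (hkeys m).1 (PySem.List.max?_mem hmax)
      have hub : ∀ x ∈ l, x ≤ m := fun x hx =>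
        PySem.List.max?_isMax hmax x ((hkeys x).2 hx)
      have hm2 : 2 ≤ m := by
        have h1k := h1 k0 hk0l
        have h2k := hub k0 hk0l
        have : k0 ≠ 1 := by simpa using hk0ne
        omega
      have hc : d.getD m 0 = (l.count m : Int) := hcnt m
      have hcpos : 1 ≤ l.count m := List.count_pos_iff.2 hml
      simp only [bLoop, hall, Bool.false_eq_true, if_false, hmax]
      have hfd1 : PySem.Int.floordiv m 2 = m / 2 := fd2 m
      have hfd2 : PySem.Int.floordiv (m - 1) 2 = (m - 1) / 2 := fd2 (m - 1)
      -- the mass of the new list after crossing the whole maximal group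
      have hsum' : sumNat (l.filter (fun x => x ≠ m) ++ List.flatten (List.replicate (l.count m) (pcs m)))
          + l.count m = sumNat l := by
        rw [sumNat_append, sumNat_flatten_replicate, sumNat_pcs hm2,
          Nat.mul_sub, Nat.mul_one, sumNat_filter_count l m]
        have hm1 : 1 ≤ m.toNat := by omega
        have : l.count m ≤ l.count m * m.toNat := Nat.le_mul_of_pos_right _ (by omega)
        omega
      by_cases hfit : 0 < p ∧ p ≤ d.getD m 0
      · -- the last person lands in this group
        rw [if_pos hfit]
        have hfa' : p.toNat ≤ fA := by
          rcases hfuel with ⟨h1', h2', h3'⟩ | ⟨h1', h2', h3'⟩ <;> omega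
        rw [ansLemma fA l p m (by omega) hfa' h1 hub hm2 (by rw [← hc]; exact hfit.2)]
        rw [ansOf_eq hm2]
      · -- A crosses the whole group; recurse
        rw [if_neg hfit]
        have hpc : p ≤ 0 ∨ (l.count m : Int) < p := by
          rcases hfuel with ⟨h1', _, _⟩ | ⟨h1', _, _⟩
          · right
            rcases not_and_or.1 hfit with h | h
            · omega
            · rw [hc] at h; omega
          · left; omega
        have hcfa : l.count m ≤ fA := by
          rcases hfuel with ⟨h1', h2', h3'⟩ | ⟨h1', h2', h3'⟩
          · rcases hpc with h | h
            · omega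
            · omega
          · omega
        rw [stepLemma (l.count m) fA l p m h1 hub hm2 rfl hpc hcfa, hc]
        refine ih _ _ _ _ ?_ ?_ ?_ ?_
        · -- count invariant for the new dict and list
          intro k
          rw [dcond_insert_add, dcond_insert_add, dgetD_erase, hcnt k,
            List.count_append, count_filter_ne, count_flatten_replicate,
            Nat.cast_add, Nat.cast_mul, pcs_count hm2 k]
          rw [hfd1, hfd2] at *
          split_ifs <;> push_cast <;> omega
        · -- key-membership invariant
          intro k
          rw [dcond_insert_mem, dcond_insert_mem, dkeys_erase_mem,
            List.mem_append, mem_flatten_replicate (by omega) (pcs m) k, pcs_mem hm2 k]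
          simp only [List.mem_filter, decide_eq_true_eq, hkeys k]
          have e3 : PySem.Int.floordiv m 2 ≠ 0 := by rw [hfd1]; omega
          tauto
        · -- positivity invariant
          intro x hx
          rcases List.mem_append.1 hx with h | h
          · exact h1 x (List.mem_of_mem_filter h)
          · exact (pcs_bounds hm2 ((mem_flatten_replicate (by omega) (pcs m) x).1 h)).1
        · -- fuel bookkeeping
          rcases hfuel with ⟨h1', h2', h3'⟩ | ⟨h1', h2', h3'⟩
          · left
            rcases hpc with h | h
            · omega
            · refine ⟨by omega, by omega, by omega⟩
          · right
            refine ⟨by omega, by omega, by omega⟩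

-- ===== VERDICT (by name: the statement is the Claim_ definition above) =====
theorem game_helper_py_spec : Claim_equal_game_helper_py := by
  intro gaps people _ hpre
  unfold Spec_game_helper_py game_helper_py game_helper_py_alt
  have hcounter : gaps.foldl (fun d g => PySem.Dict.insert d g (PySem.Dict.getD d g 0 + 1)) PySem.Dict.empty
      = PySem.Dict.counter gaps := PySem.Dict.foldl_insert_getD_add_one_eq_counter gaps
  simp only [hcounter]
  have hsum : sumNat gaps = (gaps.map Int.toNat).sum := rfl
  rw [mainLemma (people.toNat + (gaps.map Int.toNat).sum + 1) gaps (PySem.Dict.counter gaps) people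
    (people.toNat + (gaps.map Int.toNat).sum + 1)
    (fun k => PySem.Dict.getD_counter gaps k)
    (fun k => by
      rw [PySem.Dict.keys_counter]
      exact PySem.Set.mem_ofList gaps k)
    hpre
    (by
      by_cases hp : 1 ≤ people
      · exact Or.inl ⟨hp, by omega, by omega⟩
      · exact Or.inr ⟨by omega, by rw [hsum]; omega, by rw [hsum]; omega⟩)]
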